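-- pv_equiv track=rewrite | github.com/agentydragon/specimens | ducktape/2025-11-26-00/code/adgn/src/adgn/git_commit_ai/cli.py | _truncate_hunks
-- ===== SOURCE A (Python) =====
-- MAX_FILE_LINES = 400  # truncate each file's hunk lines (per-file preview)
--
-- MAX_TOTAL_DIFF_CHARS = 120_000
--
-- def _truncate_hunks(raw: str) -> str:
--     """Truncate per-file hunk sections to MAX_FILE_LINES and rejoin, then cap total size.
--
--     Notes:
--     - Per-file: keep only first MAX_FILE_LINES lines of each file section.
--     - Global: cap the final concatenated diff to MAX_TOTAL_DIFF_CHARS to protect model context.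
--     """
--     cur: list[str] = []
--     out: list[str] = []
--     lines = 0
--     for line in raw.splitlines():
--         if line.startswith(("diff --git", "index ", "--- ", "+++ ")):
--             if cur:
--                 out.append("\n".join(cur[:MAX_FILE_LINES]))
--             cur, lines = [line], 0
--         else:
--             if lines < MAX_FILE_LINES:
--                 cur.append(line)
--             lines += 1
--     if cur:
--         out.append("\n".join(cur[:MAX_FILE_LINES]))
--     result = "\n\n".join(out)
--     if len(result) > MAX_TOTAL_DIFF_CHARS:
--         total = len(result)
--         result = result[:MAX_TOTAL_DIFF_CHARS] + (
--             f"\n\n# [TRUNCATED: showing first {MAX_TOTAL_DIFF_CHARS} of {total} characters]"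
--         )
--     return result
-- ===== SOURCE B (Python) =====
-- MAX_FILE_LINES = 400
--
-- MAX_TOTAL_DIFF_CHARS = 120_000
--
--
-- def _truncate_hunks(raw: str) -> str:
--     """Truncate per-file hunk sections to MAX_FILE_LINES and rejoin, then cap total size."""
--     lines = raw.splitlines()
--     starts = [i for i, line in enumerate(lines)
--               if line.startswith(("diff --git", "index ", "--- ", "+++ "))]
--     bounds = starts + [len(lines)]
--     sections = [lines[b:e] for b, e in zip(bounds, bounds[1:])]
--     lead = lines[: bounds[0]]
--     if lead:
--         sections.insert(0, lead)
--     result = "\n\n".join("\n".join(sec[:MAX_FILE_LINES]) for sec in sections)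
--     if len(result) > MAX_TOTAL_DIFF_CHARS:
--         total = len(result)
--         result = result[:MAX_TOTAL_DIFF_CHARS] + (
--             f"\n\n# [TRUNCATED: showing first {MAX_TOTAL_DIFF_CHARS} of {total} characters]"
--         )
--     return result
-- ===== Notes on version B (the rewrite author's own statement) =====
-- stated objective: alternative
-- what changed: A's single interleaved loop with a live current-section buffer and per-section line counter is replaced by an index-based decomposition: collect the header line indices, slice the line list between consecutive boundaries (plus a non-empty leading slice), then truncate and join each slice; the total-size cap is unchanged.
import Mathlib
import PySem

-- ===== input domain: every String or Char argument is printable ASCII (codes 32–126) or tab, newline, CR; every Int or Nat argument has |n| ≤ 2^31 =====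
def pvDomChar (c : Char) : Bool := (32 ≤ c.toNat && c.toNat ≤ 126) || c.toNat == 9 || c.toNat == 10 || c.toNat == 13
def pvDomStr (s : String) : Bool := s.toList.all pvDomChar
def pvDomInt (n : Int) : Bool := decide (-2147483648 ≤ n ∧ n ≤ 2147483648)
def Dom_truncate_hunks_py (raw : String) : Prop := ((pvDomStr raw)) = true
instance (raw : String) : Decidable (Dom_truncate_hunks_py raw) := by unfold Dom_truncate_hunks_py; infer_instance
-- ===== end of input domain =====

-- B replaces A's interleaved fold (live current-section buffer + per-section line counter)
-- by an index-based decomposition: find the header line indices, slice the line list between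
-- consecutive boundaries, truncate each slice; objective: alternative (same cost).

-- ===== PORT A =====
-- line.startswith(("diff --git", "index ", "--- ", "+++ ")) — same test in both Pythons
def pvIsHeader (line : String) : Bool :=
  PySem.Str.startswith line "diff --git" || PySem.Str.startswith line "index " ||
  PySem.Str.startswith line "--- " || PySem.Str.startswith line "+++ "

-- one iteration of A's for-loop over (cur, out, lines)
def pvStepA (st : List String × List String × Int) (line : String) :
    List String × List String × Int :=
  let (cur, out, lines) := st
  if pvIsHeader line then
    ([line],
     (if cur ≠ [] then out ++ [PySem.Str.join "\n" (PySem.List.slice cur none (some 400))] else out),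
     (0 : Int))
  else
    (if lines < 400 then cur ++ [line] else cur, out, lines + 1)

def truncate_hunks_py (raw : String) : String :=
  let st := (PySem.Str.splitlines raw).foldl pvStepA ([], [], 0)
  let out := if st.1 ≠ [] then st.2.1 ++ [PySem.Str.join "\n" (PySem.List.slice st.1 none (some 400))] else st.2.1
  let result := PySem.Str.join "\n\n" out
  if PySem.Str.len result > 120000 then
    PySem.Str.slice result none (some 120000) ++
      "\n\n# [TRUNCATED: showing first 120000 of " ++ PySem.Int.toStr (PySem.Str.len result) ++ " characters]"
  else result

-- ===== PORT B =====
def truncate_hunks_py_alt (raw : String) : String :=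
  let lines := PySem.Str.splitlines raw
  let starts := ((PySem.List.enumerate lines).filter (fun p => pvIsHeader p.2)).map (·.1)
  let bounds := starts ++ [(lines.length : Int)]
  let sections := (bounds.zip bounds.tail).map (fun p => PySem.List.slice lines (some p.1) (some p.2))
  let lead := PySem.List.slice lines none (some (bounds.headD 0))
  let sections := if lead ≠ [] then lead :: sections else sections
  let result := PySem.Str.join "\n\n"
    (sections.map (fun sec => PySem.Str.join "\n" (PySem.List.slice sec none (some 400))))
  if PySem.Str.len result > 120000 then
    PySem.Str.slice result none (some 120000) ++
      "\n\n# [TRUNCATED: showing first 120000 of " ++ PySem.Int.toStr (PySem.Str.len result) ++ " characters]"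
  else result

-- ===== PRECONDITION & SPEC =====
def Spec_truncate_hunks_py (raw : String) (out : String) : Prop := out = truncate_hunks_py_alt raw
instance (raw : String) (out : String) : Decidable (Spec_truncate_hunks_py raw out) := by unfold Spec_truncate_hunks_py; infer_instance

-- ===== CLAIM (what is proved, stated in full; the proofs are below) =====
def Claim_equal_truncate_hunks_py : Prop := ∀ (raw : String), Dom_truncate_hunks_py raw → Spec_truncate_hunks_py raw (truncate_hunks_py raw)

-- ===== LEMMAS AND PROOFS =====

-- semantic grouping of the line list: head = the (possibly empty) section before the first
-- header line, every later section starts with its header line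
def pvGrp : List String → List (List String)
  | [] => [[]]
  | l :: ls =>
    let r := pvGrp ls
    if pvIsHeader l then [] :: (l :: r.headD []) :: r.tail
    else (l :: r.headD []) :: r.tail

-- the per-section truncation+join both programs apply, with the empty leading section dropped
def pvSecs : List (List String) → List String
  | [] => []
  | s :: rest =>
    (if s = [] then [] else [PySem.Str.join "\n" (s.take 400)]) ++
      rest.map (fun t => PySem.Str.join "\n" (t.take 400))

lemma pvGrp_ne_nil (ls : List String) : pvGrp ls ≠ [] := by
  cases ls <;> simp [pvGrp] <;> split <;> simp

lemma pvGrp_cons_form (ls : List String) :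
    pvGrp ls = (pvGrp ls).headD [] :: (pvGrp ls).tail := by
  cases h : pvGrp ls with
  | nil => exact absurd h (pvGrp_ne_nil ls)
  | cons a t => simp

lemma pv_slice400 (xs : List String) :
    PySem.List.slice xs none (some 400) = xs.take 400 := by
  rw [PySem.List.slice_to xs (by norm_num)]
  rfl

lemma pv_take_append_take (xs ys : List String) (n : Nat) :
    (xs ++ ys.take n).take n = (xs ++ ys).take n := by
  simp [List.take_append, List.take_take]

lemma pv_pad_ne_nil (start content : List String) (h : ¬ start ++ content = []) :
    start ++ content.take 400 ≠ [] := by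
  intro hh
  obtain ⟨h1, h2⟩ := List.append_eq_nil_iff.mp hh
  exact h (by simp [h1, (List.take_eq_nil_iff.mp h2).resolve_left (by norm_num)])

set_option maxRecDepth 4096 in
lemma pv_loopA (ls : List String) (out start content : List String) :
    (fun st : List String × List String × Int =>
        if st.1 ≠ [] then st.2.1 ++ [PySem.Str.join "\n" (PySem.List.slice st.1 none (some 400))]
        else st.2.1)
      (ls.foldl pvStepA (start ++ content.take 400, out, (content.length : Int)))
    = out ++ pvSecs ((start ++ content ++ (pvGrp ls).headD []) :: (pvGrp ls).tail) := by
  induction ls generalizing out start content with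
  | nil =>
      simp only [List.foldl_nil, pvGrp, pvSecs, List.headD, List.tail_cons, List.map_nil,
        List.append_nil]
      by_cases hne : start ++ content = []
      · obtain ⟨h1, h2⟩ := List.append_eq_nil_iff.mp hne
        subst h1; subst h2
        simp
      · have hne' := pv_pad_ne_nil start content hne
        rw [if_pos hne', if_neg hne, pv_slice400, pv_take_append_take]
  | cons l ls ih =>
      rw [List.foldl_cons]
      by_cases hl : pvIsHeader l
      · have hstep : pvStepA (start ++ content.take 400, out, (content.length : Int)) l =
            ([l] ++ ([] : List String).take 400,
             (if start ++ content.take 400 ≠ [] then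
                out ++ [PySem.Str.join "\n" (PySem.List.slice (start ++ content.take 400) none (some 400))]
              else out),
             (([] : List String).length : Int)) := by
          simp [pvStepA, hl]
        rw [hstep, ih]
        simp only [pvGrp, hl, if_true, List.headD_cons, List.tail_cons]
        by_cases hne : start ++ content = []
        · obtain ⟨h1, h2⟩ := List.append_eq_nil_iff.mp hne
          subst h1; subst h2
          simp [pvSecs]
        · have hne' := pv_pad_ne_nil start content hne
          rw [if_pos hne', pv_slice400, pv_take_append_take]
          simp only [pvSecs, List.nil_append, List.append_nil]
          rw [if_neg hne]
          have hcons : (l :: (pvGrp ls).headD []) ≠ [] := by simp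
          rw [if_neg (by simpa using hcons)]
          simp
      · have hcur : (if (content.length : Int) < 400 then (start ++ content.take 400) ++ [l]
              else start ++ content.take 400) = start ++ (content ++ [l]).take 400 := by
          by_cases hlen : content.length < 400
          · rw [if_pos (by exact_mod_cast hlen)]
            have e1 : content.take 400 = content := List.take_of_length_le (by omega)
            have e2 : (content ++ [l]).take 400 = content ++ [l] :=
              List.take_of_length_le (by simp; omega)
            rw [e1, e2, List.append_assoc]
            try rfl
          · rw [if_neg (by intro h; exact hlen (by exact_mod_cast h))]
            rw [List.take_append_of_le_length (by omega)]
        have hstep : pvStepA (start ++ content.take 400, out, (content.length : Int)) l =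
            (start ++ (content ++ [l]).take 400, out, ((content ++ [l]).length : Int)) := by
          simp only [pvStepA, hl, if_false, Bool.false_eq_true]
          refine Prod.ext ?_ (Prod.ext rfl ?_)
          · exact hcur
          · simp
            try (push_cast; ring)
        rw [hstep, ih]
        simp only [pvGrp, hl, if_false, Bool.false_eq_true, List.headD_cons, List.tail_cons]
        simp

def pvStarts (ls : List String) (s : Int) : List Int :=
  ((PySem.List.enumerate ls s).filter (fun p => pvIsHeader p.2)).map (·.1)

lemma pvStarts_nil (s : Int) : pvStarts [] s = [] := by
  simp [pvStarts, PySem.List.enumerate_nil]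

lemma pvStarts_cons (l : String) (ls : List String) (s : Int) :
    pvStarts (l :: ls) s = (if pvIsHeader l then [s] else []) ++ pvStarts ls (s + 1) := by
  simp only [pvStarts, PySem.List.enumerate_cons, List.filter_cons]
  split <;> simp_all

lemma pvStarts_shift (ls : List String) (s : Int) :
    pvStarts ls (s + 1) = (pvStarts ls s).map (· + 1) := by
  induction ls generalizing s with
  | nil => simp [pvStarts_nil]
  | cons l ls ih =>
      simp only [pvStarts_cons, ih, List.map_append]
      split <;> simp

lemma pvStarts_nonneg (ls : List String) (s : Int) : ∀ x ∈ pvStarts ls s, s ≤ x := by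
  induction ls generalizing s with
  | nil => simp [pvStarts_nil]
  | cons l ls ih =>
      intro x hx
      rw [pvStarts_cons] at hx
      rcases List.mem_append.mp hx with h | h
      · split at h <;> simp_all
      · have := ih (s + 1) x h; omega

def pvBounds (ls : List String) : List Int := pvStarts ls 0 ++ [(ls.length : Int)]

lemma pvBounds_ne_nil (ls : List String) : pvBounds ls ≠ [] := by simp [pvBounds]

lemma pvBounds_nonneg (ls : List String) : ∀ x ∈ pvBounds ls, 0 ≤ x := by
  intro x hx
  rcases List.mem_append.mp hx with h | h
  · exact pvStarts_nonneg ls 0 x h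
  · simp at h; omega

lemma pvBounds_cons (l : String) (ls : List String) :
    pvBounds (l :: ls) =
      if pvIsHeader l then 0 :: (pvBounds ls).map (· + 1) else (pvBounds ls).map (· + 1) := by
  have h1 : pvStarts ls 1 = (pvStarts ls 0).map (· + 1) := by
    simpa using pvStarts_shift ls 0
  simp only [pvBounds, pvStarts_cons, List.map_append, List.length_cons, zero_add, h1]
  split <;> (push_cast; simp; try (congr 1; ext x; ring))

lemma pv_slice_cons_shift (l : String) (ls : List String) (b e : Int) (hb : 0 ≤ b) (he : 0 ≤ e) :
    PySem.List.slice (l :: ls) (some (b + 1)) (some (e + 1)) = PySem.List.slice ls (some b) (some e) := by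
  rw [PySem.List.slice_toNat _ (by omega) (by omega), PySem.List.slice_toNat _ hb he]
  have h1 : (b + 1).toNat = b.toNat + 1 := by omega
  have h2 : (e + 1).toNat = e.toNat + 1 := by omega
  rw [h1, h2, List.drop_succ_cons]
  congr 1
  omega

lemma pv_slice_take_cons (l : String) (ls : List String) (b : Int) (hb : 0 ≤ b) :
    PySem.List.slice (l :: ls) none (some (b + 1)) = l :: PySem.List.slice ls none (some b) := by
  rw [PySem.List.slice_to _ (by omega), PySem.List.slice_to _ hb]
  have : (b + 1).toNat = b.toNat + 1 := by omega
  rw [this, List.take_succ_cons]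

lemma pvB_char (ls : List String) :
    PySem.List.slice ls none (some ((pvBounds ls).headD 0)) = (pvGrp ls).headD []
    ∧ ((pvBounds ls).zip (pvBounds ls).tail).map
        (fun p => PySem.List.slice ls (some p.1) (some p.2)) = (pvGrp ls).tail := by
  induction ls with
  | nil =>
      constructor
      · rw [show (pvBounds ([] : List String)).headD 0 = 0 by simp [pvBounds, pvStarts_nil]]
        rw [PySem.List.slice_to _ le_rfl]
        simp [pvGrp]
      · simp [pvBounds, pvStarts_nil, pvGrp]
  | cons l ls ih =>
      obtain ⟨ih1, ih2⟩ := ih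
      obtain ⟨b0, Bt, hB⟩ : ∃ b0 Bt, pvBounds ls = b0 :: Bt := by
        cases h : pvBounds ls with
        | nil => exact absurd h (pvBounds_ne_nil ls)
        | cons a t => exact ⟨a, t, rfl⟩
      have hb0 : 0 ≤ b0 := pvBounds_nonneg ls b0 (by rw [hB]; exact List.mem_cons_self)
      rw [hB] at ih1
      simp only [List.headD_cons] at ih1
      have hzip : ∀ p ∈ (pvBounds ls).zip (pvBounds ls).tail,
          PySem.List.slice (l :: ls) (some (p.1 + 1)) (some (p.2 + 1)) =
            PySem.List.slice ls (some p.1) (some p.2) := by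
        intro p hp
        obtain ⟨h1, h2⟩ := List.of_mem_zip hp
        exact pv_slice_cons_shift l ls p.1 p.2 (pvBounds_nonneg ls p.1 h1)
          (pvBounds_nonneg ls p.2 (List.mem_of_mem_tail h2))
      have hrest : ((pvBounds ls).zip (pvBounds ls).tail).map
          ((fun p : Int × Int => PySem.List.slice (l :: ls) (some p.1) (some p.2)) ∘
            (fun p : Int × Int => (p.1 + 1, p.2 + 1))) = (pvGrp ls).tail := by
        rw [← ih2]
        exact List.map_congr_left (fun p hp => hzip p hp)
      have hzipmap : ((pvBounds (l :: ls)).zip (pvBounds (l :: ls)).tail) =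
          (if pvIsHeader l then [((0 : Int), b0 + 1)] else []) ++
            ((pvBounds ls).zip (pvBounds ls).tail).map (fun p => (p.1 + 1, p.2 + 1)) := by
        rw [pvBounds_cons, hB]
        split
        · simp only [List.map_cons, List.tail_cons, List.zip_cons_cons]
          rw [show ((b0 + 1) :: Bt.map (· + 1)) = (b0 :: Bt).map (· + 1) from rfl, List.zip_map]
          simp [Prod.map]
        · simp only [List.map_cons, List.tail_cons, List.zip_cons_cons]
          rw [show ((b0 + 1) :: Bt.map (· + 1)) = (b0 :: Bt).map (· + 1) from rfl, List.zip_map]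
          simp [Prod.map]
      by_cases hl : pvIsHeader l
      · constructor
        · rw [pvBounds_cons, if_pos hl]
          simp only [List.headD_cons]
          rw [PySem.List.slice_to _ le_rfl]
          simp [pvGrp, hl]
        · rw [hzipmap, if_pos hl]
          simp only [List.map_append, List.map_cons, List.map_nil, List.map_map]
          have hfirst : PySem.List.slice (l :: ls) (some 0) (some (b0 + 1)) =
              l :: (pvGrp ls).headD [] := by
            rw [PySem.List.slice_zero_start, pv_slice_take_cons l ls b0 hb0, ih1]
          rw [hfirst, hrest]
          simp [pvGrp, hl]
      · constructor
        · rw [pvBounds_cons, if_neg hl, hB]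
          simp only [List.map_cons, List.headD_cons]
          rw [pv_slice_take_cons l ls b0 hb0, ih1]
          simp [pvGrp, hl]
        · rw [hzipmap, if_neg hl]
          simp only [List.nil_append, List.map_map]
          rw [hrest]
          simp [pvGrp, hl]

lemma pv_outA (ls : List String) :
    (if (ls.foldl pvStepA ([], [], 0)).1 ≠ [] then
        (ls.foldl pvStepA ([], [], 0)).2.1 ++
          [PySem.Str.join "\n" (PySem.List.slice (ls.foldl pvStepA ([], [], 0)).1 none (some 400))]
      else (ls.foldl pvStepA ([], [], 0)).2.1) = pvSecs (pvGrp ls) := by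
  have h := pv_loopA ls [] [] []
  dsimp only at h
  simp only [List.take_nil, List.append_nil, List.nil_append, List.length_nil, Nat.cast_zero] at h
  rw [h]
  conv_rhs => rw [pvGrp_cons_form ls]

lemma pv_alt_sections (ls : List String) :
    (let starts := ((PySem.List.enumerate ls).filter (fun p => pvIsHeader p.2)).map (·.1)
     let bounds := starts ++ [(ls.length : Int)]
     let sections := (bounds.zip bounds.tail).map (fun p => PySem.List.slice ls (some p.1) (some p.2))
     let lead := PySem.List.slice ls none (some (bounds.headD 0))
     let sections := if lead ≠ [] then lead :: sections else sections
     sections.map (fun sec => PySem.Str.join "\n" (PySem.List.slice sec none (some 400))))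
    = pvSecs (pvGrp ls) := by
  obtain ⟨h1, h2⟩ := pvB_char ls
  dsimp only
  rw [show ((PySem.List.enumerate ls).filter (fun p => pvIsHeader p.2)).map (·.1) ++
      [(ls.length : Int)] = pvBounds ls from rfl]
  rw [h1, h2]
  by_cases hh : (pvGrp ls).headD [] = []
  · rw [if_neg (by simpa using hh)]
    conv_rhs => rw [pvGrp_cons_form ls]
    simp [pvSecs, pv_slice400]
    simpa using hh
  · rw [if_pos (by simpa using hh)]
    conv_rhs => rw [pvGrp_cons_form ls]
    simp [pvSecs, pv_slice400]
    rw [if_neg (by simpa using hh)]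
    simp

-- ===== VERDICT (by name: the statement is the Claim_ definition above) =====
theorem truncate_hunks_py_spec : Claim_equal_truncate_hunks_py := by
  intro raw _
  unfold Spec_truncate_hunks_py truncate_hunks_py truncate_hunks_py_alt
  dsimp only
  rw [pv_outA (PySem.Str.splitlines raw), pv_alt_sections (PySem.Str.splitlines raw)]
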